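-- pv_equiv track=rewrite | github.com/Faksxs/Tomehubnew | apps/backend/scripts/apply_external_api_keys_migration.py | _split_sql_blocks
-- ===== SOURCE A (Python) =====
-- def _split_sql_blocks(sql_text: str) -> list[str]:
--     commands: list[str] = []
--     current: list[str] = []
--
--     for line in sql_text.splitlines():
--         stripped = line.strip()
--         if stripped == "/":
--             if current:
--                 commands.append("\n".join(current).strip())
--                 current = []
--             continue
--         current.append(line)
--
--     if current:
--         commands.append("\n".join(current).strip())
--     return [cmd for cmd in commands if cmd]
-- ===== SOURCE B (Python) =====
-- from itertools import groupby
--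
--
-- def _split_sql_blocks(sql_text: str) -> list[str]:
--     commands: list[str] = []
--     for is_sep, run in groupby(sql_text.splitlines(), key=lambda line: line.strip() == "/"):
--         if is_sep:
--             continue
--         block = "\n".join(run).strip()
--         if block:
--             commands.append(block)
--     return commands
-- ===== Notes on version B (the rewrite author's own statement) =====
-- stated objective: idiomatic
-- what changed: Replaces the explicit current-list accumulator with its separate flush-on-separator and post-loop flush by itertools.groupby over the lines keyed on whether a stripped line equals a single slash, joining and filtering each non-separator run directly, with no final filtering pass.
import Mathlib
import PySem

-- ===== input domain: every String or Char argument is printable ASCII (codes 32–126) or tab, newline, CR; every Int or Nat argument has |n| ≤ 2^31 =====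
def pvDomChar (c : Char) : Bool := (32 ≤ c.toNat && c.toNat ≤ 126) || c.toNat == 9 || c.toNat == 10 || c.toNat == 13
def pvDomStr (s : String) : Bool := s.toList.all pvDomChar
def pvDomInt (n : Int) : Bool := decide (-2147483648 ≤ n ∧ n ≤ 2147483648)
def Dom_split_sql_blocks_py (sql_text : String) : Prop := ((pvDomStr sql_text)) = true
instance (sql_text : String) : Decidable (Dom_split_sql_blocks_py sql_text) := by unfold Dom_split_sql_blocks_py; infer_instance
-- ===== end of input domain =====

-- B rewrites A's explicit accumulator-with-flush loop as grouping of consecutive line runs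
-- (itertools.groupby keyed on "is a '/' line"), joining each non-separator run directly (idiomatic).

-- ===== PORT A =====
-- one loop step of A: flush `current` on a '/' line, otherwise append the line
def pvAStep (st : List String × List String) (line : String) : List String × List String :=
  if PySem.Str.strip line == "/" then
    if st.2 ≠ [] then (st.1 ++ [PySem.Str.strip (PySem.Str.join "\n" st.2)], [])
    else st
  else (st.1, st.2 ++ [line])

def split_sql_blocks_py (sql_text : String) : List String :=
  let st := (PySem.Str.splitlines sql_text).foldl pvAStep ([], [])
  let commands := if st.2 ≠ [] then st.1 ++ [PySem.Str.strip (PySem.Str.join "\n" st.2)] else st.1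
  commands.filter (fun cmd => cmd != "")

-- ===== PORT B =====
def pvIsSep (line : String) : Bool := PySem.Str.strip line == "/"

-- faithful port of itertools.groupby(lines, key=pvIsSep): maximal runs of equal key
def pvGroupRuns : List String → List (Bool × List String)
  | [] => []
  | l :: ls =>
    (pvIsSep l, l :: ls.takeWhile (fun x => pvIsSep x == pvIsSep l)) ::
      pvGroupRuns (ls.dropWhile (fun x => pvIsSep x == pvIsSep l))
termination_by ls => ls.length
decreasing_by exact Nat.lt_succ_of_le (List.length_dropWhile_le _ _)

-- one loop step of B over a (key, run) group
def pvBStep (commands : List String) (g : Bool × List String) : List String :=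
  if g.1 then commands
  else
    let block := PySem.Str.strip (PySem.Str.join "\n" g.2)
    if block != "" then commands ++ [block] else commands

def split_sql_blocks_py_alt (sql_text : String) : List String :=
  (pvGroupRuns (PySem.Str.splitlines sql_text)).foldl pvBStep []

-- ===== PRECONDITION & SPEC =====
def Spec_split_sql_blocks_py (sql_text : String) (out : List String) : Prop := out = split_sql_blocks_py_alt sql_text
instance (sql_text : String) (out : List String) : Decidable (Spec_split_sql_blocks_py sql_text out) := by unfold Spec_split_sql_blocks_py; infer_instance

-- ===== CLAIM (what is proved, stated in full; the proofs are below) =====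
def Claim_equal_split_sql_blocks_py : Prop := ∀ (sql_text : String), Dom_split_sql_blocks_py sql_text → Spec_split_sql_blocks_py sql_text (split_sql_blocks_py sql_text)

-- ===== LEMMAS AND PROOFS =====

-- A's finishing step: final flush and the non-empty filter
def pvFinish (st : List String × List String) : List String :=
  (if st.2 ≠ [] then st.1 ++ [PySem.Str.strip (PySem.Str.join "\n" st.2)] else st.1).filter
    (fun cmd => cmd != "")

theorem pvA_sep_run (run : List String) (cmds : List String)
    (h : ∀ x ∈ run, pvIsSep x = true) :
    run.foldl pvAStep (cmds, []) = (cmds, []) := by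
  induction run with
  | nil => rfl
  | cons a as ih =>
      have ha : pvIsSep a = true := h a (by simp)
      simp only [List.foldl_cons]
      have : pvAStep (cmds, []) a = (cmds, []) := by
        simp [pvAStep, pvIsSep] at ha ⊢; simp [ha]
      rw [this]
      exact ih fun x hx => h x (by simp [hx])

theorem pvA_nonsep_run (run : List String) (cmds cur : List String)
    (h : ∀ x ∈ run, pvIsSep x = false) :
    run.foldl pvAStep (cmds, cur) = (cmds, cur ++ run) := by
  induction run generalizing cur with
  | nil => simp
  | cons a as ih =>
      have ha : pvIsSep a = false := h a (by simp)
      simp only [List.foldl_cons]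
      have : pvAStep (cmds, cur) a = (cmds, cur ++ [a]) := by
        simp [pvAStep, pvIsSep] at ha ⊢; simp [ha]
      rw [this, ih (cur ++ [a]) (fun x hx => h x (by simp [hx]))]
      simp

theorem pvB_acc (gs : List (Bool × List String)) (acc : List String) :
    gs.foldl pvBStep acc = acc ++ gs.foldl pvBStep [] := by
  induction gs generalizing acc with
  | nil => simp
  | cons g gs ih =>
      simp only [List.foldl_cons]
      rw [ih (pvBStep acc g), ih (pvBStep [] g)]
      have : pvBStep acc g = acc ++ pvBStep [] g := by
        simp only [pvBStep]
        split_ifs <;> simp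
      rw [this, List.append_assoc]

theorem pvMain (lines : List String) : ∀ cmds : List String,
    pvFinish (lines.foldl pvAStep (cmds, [])) =
      cmds.filter (fun cmd => cmd != "") ++ (pvGroupRuns lines).foldl pvBStep [] := by
  induction lines using pvGroupRuns.induct with
  | case1 => intro cmds; simp [pvFinish, pvGroupRuns]
  | case2 l ls ih =>
      intro cmds
      set p := fun x => pvIsSep x == pvIsSep l with hp
      have hsplit : ls = ls.takeWhile p ++ ls.dropWhile p := (List.takeWhile_append_dropWhile).symm
      by_cases hl : pvIsSep l = true
      · -- separator run: A leaves the state unchanged, B skips the group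
        have hstep : pvAStep (cmds, []) l = (cmds, []) := by
          simp [pvAStep, pvIsSep] at hl ⊢; simp [hl]
        have htake : ∀ x ∈ ls.takeWhile p, pvIsSep x = true := by
          intro x hx
          have := List.mem_takeWhile_imp hx
          simp [hp, hl] at this; exact this
        calc pvFinish ((l :: ls).foldl pvAStep (cmds, []))
            = pvFinish ((ls.dropWhile p).foldl pvAStep (cmds, [])) := by
              conv_lhs => rw [List.foldl_cons, hstep, hsplit, List.foldl_append,
                pvA_sep_run _ _ htake]
          _ = cmds.filter (fun cmd => cmd != "") ++ (pvGroupRuns (ls.dropWhile p)).foldl pvBStep [] :=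
              ih cmds
          _ = _ := by
              rw [pvGroupRuns]
              simp only [List.foldl_cons]
              have : pvBStep [] (pvIsSep l, l :: ls.takeWhile p) = [] := by simp [pvBStep, hl]
              rw [pvB_acc _ (pvBStep [] _), this]
              simp [hp]
      · -- non-separator run: A accumulates the run into `current`, B emits the joined block
        have hl' : pvIsSep l = false := by simpa using hl
        have hstep : pvAStep (cmds, []) l = (cmds, [l]) := by
          simp [pvAStep, pvIsSep] at hl' ⊢; simp [hl']
        have htake : ∀ x ∈ ls.takeWhile p, pvIsSep x = false := by
          intro x hx
          have := List.mem_takeWhile_imp hx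
          simp [hp, hl'] at this; exact this
        set run := ls.takeWhile p with hrun
        set rest := ls.dropWhile p with hrest
        set blk := PySem.Str.strip (PySem.Str.join "\n" (l :: run)) with hblk
        have hA1 : (l :: ls).foldl pvAStep (cmds, []) = rest.foldl pvAStep (cmds, l :: run) := by
          conv_lhs => rw [List.foldl_cons, hstep, hsplit, List.foldl_append,
            pvA_nonsep_run _ _ _ htake]
          rfl
        have hkey : pvFinish (rest.foldl pvAStep (cmds, l :: run)) =
            pvFinish (rest.foldl pvAStep (cmds ++ [blk], [])) := by
          cases hr : rest with
          | nil => simp [pvFinish, hblk]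
          | cons r rs =>
              have hrsep : pvIsSep r = true := by
                have : p r = false := by
                  have := List.head?_dropWhile_not p ls
                  rw [← hrest, hr] at this
                  simp at this; exact this
                simp [hp, hl'] at this; exact this
              have h1 : pvAStep (cmds, l :: run) r = (cmds ++ [blk], []) := by
                simp [pvAStep, pvIsSep] at hrsep ⊢; simp [hrsep, hblk]
              have h2 : pvAStep (cmds ++ [blk], []) r = (cmds ++ [blk], []) := by
                simp [pvAStep, pvIsSep] at hrsep ⊢; simp [hrsep]
              simp only [List.foldl_cons, h1, h2]
        calc pvFinish ((l :: ls).foldl pvAStep (cmds, []))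
            = pvFinish (rest.foldl pvAStep (cmds ++ [blk], [])) := by rw [hA1, hkey]
          _ = (cmds ++ [blk]).filter (fun cmd => cmd != "") ++ (pvGroupRuns rest).foldl pvBStep [] :=
              ih (cmds ++ [blk])
          _ = _ := by
              rw [pvGroupRuns]
              simp only [List.foldl_cons]
              have hfilt : List.filter (fun cmd => cmd != "") [blk] = if blk != "" then [blk] else [] := by
                by_cases hb : blk = "" <;> simp [hb]
              have : pvBStep [] (pvIsSep l, l :: run) = if blk != "" then [blk] else [] := by
                simp only [pvBStep, hl', Bool.false_eq_true, if_false, hblk]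
                split <;> simp
              rw [pvB_acc _ (pvBStep [] _), this, ← hfilt, List.filter_append, List.append_assoc]

-- ===== VERDICT (by name: the statement is the Claim_ definition above) =====
theorem split_sql_blocks_py_spec : Claim_equal_split_sql_blocks_py := by
  intro sql_text _
  unfold Spec_split_sql_blocks_py split_sql_blocks_py split_sql_blocks_py_alt
  have := pvMain (PySem.Str.splitlines sql_text) []
  simpa [pvFinish] using this
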